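-- pv_equiv track=rewrite | github.com/Sunggggggg/egocentric | lib/dataset/codebook_dataloader.py | _group_data_by_video
-- ===== SOURCE A (Python) =====
-- def _group_data_by_video(names):
--     video_indices = {}
--     if len(names) == 0:
--         return video_indices
--     current_name = names[0]
--     start_idx = 0
--
--     for i, name in enumerate(names):
--         if name != current_name:
--             video_indices[current_name] = (start_idx, i)
--             current_name = name
--             start_idx = i
--
--     video_indices[current_name] = (start_idx, len(names))
--     return video_indices
-- ===== SOURCE B (Python) =====
-- def _group_data_by_video(names):
--     n = len(names)
--     video_indices = {}
--     if n == 0: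
--         return video_indices
--     boundaries = [0]
--     for i in range(1, n):
--         if names[i] != names[i - 1]:
--             boundaries.append(i)
--     boundaries.append(n)
--     for b, nb in zip(boundaries, boundaries[1:]):
--         video_indices[names[b]] = (b, nb)
--     return video_indices
-- ===== Notes on version B (the rewrite author's own statement) =====
-- stated objective: alternative
-- what changed: Replaced A's single-pass running current_name/start_idx state machine by two staged passes: first build a boundary-index table [0] + change points + n, then emit each (start, end) entry by zipping the table with its own tail.
import Mathlib
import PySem

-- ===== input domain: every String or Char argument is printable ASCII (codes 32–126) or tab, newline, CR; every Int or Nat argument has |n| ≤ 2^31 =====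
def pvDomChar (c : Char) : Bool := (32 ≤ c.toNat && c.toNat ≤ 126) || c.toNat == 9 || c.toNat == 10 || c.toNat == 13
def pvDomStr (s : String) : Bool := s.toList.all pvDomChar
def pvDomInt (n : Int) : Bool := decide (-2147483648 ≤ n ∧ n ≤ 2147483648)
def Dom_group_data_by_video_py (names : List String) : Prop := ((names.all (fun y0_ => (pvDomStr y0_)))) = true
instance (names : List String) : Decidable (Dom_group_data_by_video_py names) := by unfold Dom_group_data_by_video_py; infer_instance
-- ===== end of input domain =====

-- B replaces A's running current_name/start_idx state machine by two staged passes: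
-- build a boundary-index table [0] + change points + n, then emit entries by zipping
-- the table with its own tail (objective: alternative).


-- ===== PORT A =====
-- the 'for i, name in enumerate(names)' loop with state (dict, current_name, start_idx);
-- the post-loop insert 'video_indices[current_name] = (start_idx, len(names))' is the base case
-- (i then equals len(names))
def pvLoopA (d : PySem.Dict String (Int × Int)) (cur : String) (start i : Nat) :
    List String → PySem.Dict String (Int × Int)
  | [] => d.insert cur ((start : Int), (i : Int))
  | x :: xs =>
    if x ≠ cur then pvLoopA (d.insert cur ((start : Int), (i : Int))) x i (i + 1) xs
    else pvLoopA d cur start (i + 1) xs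

def group_data_by_video_py (names : List String) : List (String × Int × Int) :=
  match names with
  | [] => []
  | n0 :: _ => (pvLoopA PySem.Dict.empty n0 0 0 names).items

-- ===== PORT B =====
-- boundaries = [0]; for i in range(1, n): if names[i] != names[i-1]: boundaries.append(i);
-- boundaries.append(n); then for b, nb in zip(boundaries, boundaries[1:]): dict[names[b]] = (b, nb).
-- names[i] / names[i-1] / names[b] are always in range here, so pyGetD with a default is exact.
def pvBoundaries (names : List String) : List Int :=
  (PySem.List.pyRange 1 (names.length : Int) 1).foldl
    (fun bs i =>
      if PySem.List.pyGetD names i "" ≠ PySem.List.pyGetD names (i - 1) "" then bs ++ [i]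
      else bs)
    [(0 : Int)]

def pvEmitB (names : List String) (bnds2 : List Int) : List (String × Int × Int) :=
  ((bnds2.zip (PySem.List.slice bnds2 (some 1) none)).foldl
      (fun d p => d.insert (PySem.List.pyGetD names p.1 "") (p.1, p.2))
      PySem.Dict.empty).items

def group_data_by_video_py_alt (names : List String) : List (String × Int × Int) :=
  if (names.length : Int) = 0 then []
  else pvEmitB names (pvBoundaries names ++ [(names.length : Int)])

-- ===== PRECONDITION & SPEC =====
def Spec_group_data_by_video_py (names : List String) (out : List (String × Int × Int)) : Prop := out = group_data_by_video_py_alt names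
instance (names : List String) (out : List (String × Int × Int)) : Decidable (Spec_group_data_by_video_py names out) := by unfold Spec_group_data_by_video_py; infer_instance

-- ===== CLAIM (what is proved, stated in full; the proofs are below) =====
def Claim_equal_group_data_by_video_py : Prop := ∀ (names : List String), Dom_group_data_by_video_py names → Spec_group_data_by_video_py names (group_data_by_video_py names)

-- ===== LEMMAS AND PROOFS =====

-- length of the leading block of xs equal to x
def pvCountEq (x : String) : List String → Nat
  | [] => 0
  | y :: ys => if y = x then pvCountEq x ys + 1 else 0

-- A's run segments 'name ↦ (start, end)' as a list, in emission order
def pvSegs (cur : String) (start i : Nat) : List String → List (String × Nat × Nat)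
  | [] => [(cur, start, i)]
  | x :: xs => if x ≠ cur then (cur, start, i) :: pvSegs x i (i + 1) xs else pvSegs cur start (i + 1) xs

theorem pvCountEq_le (x : String) (xs : List String) : pvCountEq x xs ≤ xs.length := by
  induction xs with
  | nil => simp [pvCountEq]
  | cons y ys ih => simp only [pvCountEq, List.length_cons]; split <;> omega

-- the common run list both ports reduce to
def pvRunsB (i : Nat) : List String → List (String × Nat × Nat)
  | [] => []
  | x :: xs =>
    (x, i, i + 1 + pvCountEq x xs) :: pvRunsB (i + 1 + pvCountEq x xs) (xs.drop (pvCountEq x xs))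
termination_by l => l.length
decreasing_by simp [List.length_drop]

theorem pvRunsB_nil (i : Nat) : pvRunsB i [] = [] := by
  rw [pvRunsB.eq_def]

theorem pvRunsB_cons (i : Nat) (x : String) (xs : List String) :
    pvRunsB i (x :: xs) =
      (x, i, i + 1 + pvCountEq x xs) ::
        pvRunsB (i + 1 + pvCountEq x xs) (xs.drop (pvCountEq x xs)) := by
  conv_lhs => rw [pvRunsB.eq_def]

def pvIns (d : PySem.Dict String (Int × Int)) (t : String × Nat × Nat) : PySem.Dict String (Int × Int) :=
  d.insert t.1 ((t.2.1 : Int), (t.2.2 : Int))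

theorem pvLoopA_eq (xs : List String) : ∀ d cur start i,
    pvLoopA d cur start i xs = (pvSegs cur start i xs).foldl pvIns d := by
  induction xs with
  | nil => intro d cur start i; simp [pvLoopA, pvSegs, pvIns]
  | cons x xs ih =>
    intro d cur start i
    simp only [pvLoopA, pvSegs]
    split
    · rw [ih]; rfl
    · rw [ih]

theorem pvSegs_eq_runsB (xs : List String) : ∀ cur start i,
    pvSegs cur start i xs =
      (cur, start, i + pvCountEq cur xs) ::
        pvRunsB (i + pvCountEq cur xs) (xs.drop (pvCountEq cur xs)) := by
  induction xs with
  | nil => intro cur start i; simp [pvSegs, pvCountEq, pvRunsB_nil]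
  | cons x xs ih =>
    intro cur start i
    by_cases h : x = cur
    · subst h
      rw [pvSegs, if_neg (by simp), pvCountEq, if_pos rfl, ih]
      have e : i + (pvCountEq x xs + 1) = i + 1 + pvCountEq x xs := by omega
      rw [e, List.drop_succ_cons]
    · rw [pvSegs, if_pos h, pvCountEq, if_neg h]
      simp only [Nat.add_zero, List.drop_zero]
      rw [pvRunsB_cons, ih]

-- B-side abstractions: the Nat boundary tail and the emitted segment of a boundary pair
def pvQb (names : List String) (j : Nat) : Bool :=
  decide (names.getD j "" ≠ names.getD (j - 1) "")

def pvTail (names : List String) (i : Nat) : List Nat :=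
  (List.range' (i + 1) (names.length - i - 1)).filter (pvQb names)

def pvEmit (names : List String) (p : Nat × Nat) : String × Nat × Nat :=
  (names.getD p.1 "", p.1, p.2)

theorem pvCountEq_getD (x : String) (xs : List String) (d : String) :
    ∀ k, k < pvCountEq x xs → xs.getD k d = x := by
  induction xs with
  | nil => simp [pvCountEq]
  | cons y ys ih =>
    intro k hk
    simp only [pvCountEq] at hk
    by_cases h : y = x
    · rw [if_pos h] at hk
      cases k with
      | zero => simpa using h
      | succ k => simpa using ih k (by omega)
    · rw [if_neg h] at hk; omega

theorem pvCountEq_getD_ne (x : String) (xs : List String) (d : String)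
    (h : pvCountEq x xs < xs.length) : xs.getD (pvCountEq x xs) d ≠ x := by
  induction xs with
  | nil => simp at h
  | cons y ys ih =>
    simp only [pvCountEq] at h ⊢
    by_cases hy : y = x
    · rw [if_pos hy] at h ⊢
      simpa using ih (by simpa using h)
    · rw [if_neg hy]
      simpa using hy

theorem pvDrop_getD (names ys : List String) (i : Nat) (hd : names.drop i = ys) :
    ∀ k d, k < ys.length → names.getD (i + k) d = ys.getD k d := by
  intro k d hk
  have h0 : names[i + k]? = ys[k]? := by
    rw [← hd, List.getElem?_drop]
  simp [List.getD, h0]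

-- MAIN B-side lemma: zipping the boundary table with its tail yields the run list
theorem pvZip_spec (names : List String) (ys : List String) (i : Nat)
    (hd : names.drop i = ys) (hne : ys ≠ []) :
    (((i :: pvTail names i) ++ [names.length]).zip (pvTail names i ++ [names.length])).map
        (pvEmit names) = pvRunsB i ys := by
  match ys, hne with
  | x :: ys', _ =>
    have hlen : ys'.length + 1 = names.length - i := by
      have := congrArg List.length hd; simp at this; omega
    have hi : i < names.length := by omega
    have hx : names.getD i "" = x := by
      have h := pvDrop_getD names (x :: ys') i hd 0 "" (by simp)
      simpa using h
    have hx0 : names[i]?.getD "" = x := by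
      rw [← List.getD_eq_getElem?_getD]; exact hx
    have hdrop1 : names.drop (i + 1) = ys' := by
      have h : names.drop (i + 1) = (names.drop i).drop 1 := by
        rw [List.drop_drop]
      rw [h, hd]; rfl
    set c := pvCountEq x ys' with hc
    have hcle : c ≤ ys'.length := pvCountEq_le x ys'
    -- an index strictly inside the first run reads x
    have hread : ∀ k, k < c → names.getD (i + 1 + k) "" = x := by
      intro k hk
      rw [show i + 1 + k = i + (1 + k) by omega,
        pvDrop_getD names (x :: ys') i hd (1 + k) ""
          (by simp only [List.length_cons]; omega),
        show 1 + k = k + 1 by omega, List.getD_cons_succ]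
      exact pvCountEq_getD x ys' "" k hk
    -- elements of the first run window do not pass the boundary test
    have hwin : ∀ j ∈ List.range' (i + 1) c, pvQb names j = false := by
      intro j hj
      rw [List.mem_range'_1] at hj
      obtain ⟨k, hkc, hj'⟩ : ∃ k, k < c ∧ j = i + 1 + k :=
        ⟨j - (i + 1), by omega, by omega⟩
      have e1 : names.getD j "" = x := hj' ▸ hread k hkc
      have e2 : names.getD (j - 1) "" = x := by
        cases k with
        | zero =>
          rw [show j - 1 = i by omega]; exact hx
        | succ k' =>
          rw [show j - 1 = i + 1 + k' by omega]
          exact hread k' (by omega)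
      simp only [pvQb]
      rw [e1, e2]
      simp
    have hsplit : List.range' (i + 1) (names.length - i - 1) =
        List.range' (i + 1) c ++ List.range' (i + 1 + c) (names.length - i - 1 - c) := by
      rw [show i + 1 + c = (i + 1) + 1 * c by omega, List.range'_append]
      congr 1; omega
    have hfilter_nil : (List.range' (i + 1) c).filter (pvQb names) = [] := by
      rw [List.filter_eq_nil_iff]; intro j hj; simp [hwin j hj]
    by_cases hend : i + 1 + c = names.length
    · -- the first run extends to the end of the list
      have htail : pvTail names i = [] := by
        unfold pvTail
        rw [hsplit, List.filter_append, hfilter_nil]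
        simp [show names.length - i - 1 - c = 0 by omega]
      have hdropc : ys'.drop c = [] := List.drop_eq_nil_of_le (by omega)
      rw [pvRunsB_cons, ← hc, hdropc, pvRunsB_nil, htail]
      simp [pvEmit, hx0, hend]
    · -- there is a boundary at i + 1 + c
      have hlt : i + 1 + c < names.length := by omega
      have hclt : c < ys'.length := by omega
      have hq : pvQb names (i + 1 + c) = true := by
        have e1 : names.getD (i + 1 + c) "" ≠ x := by
          rw [show i + 1 + c = i + (1 + c) by omega,
            pvDrop_getD names (x :: ys') i hd (1 + c) ""
              (by simp only [List.length_cons]; omega),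
            show 1 + c = c + 1 by omega, List.getD_cons_succ]
          exact pvCountEq_getD_ne x ys' "" hclt
        have e2 : names.getD (i + 1 + c - 1) "" = x := by
          cases Nat.eq_zero_or_pos c with
          | inl h0 => rw [show i + 1 + c - 1 = i by omega]; exact hx
          | inr h0 =>
            rw [show i + 1 + c - 1 = i + 1 + (c - 1) by omega]
            exact hread (c - 1) (by omega)
        simp only [pvQb]
        rw [e2]
        simpa using e1
      have htail : pvTail names i = (i + 1 + c) :: pvTail names (i + 1 + c) := by
        unfold pvTail
        rw [hsplit, List.filter_append, hfilter_nil, List.nil_append,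
          show names.length - i - 1 - c = (names.length - (i + 1 + c) - 1) + 1 by omega,
          List.range'_succ, List.filter_cons, if_pos hq]
      have hdrop2 : names.drop (i + 1 + c) = ys'.drop c := by
        have h : names.drop (i + 1 + c) = (names.drop (i + 1)).drop c := by
          rw [List.drop_drop]
        rw [h, hdrop1]
      have hne2 : ys'.drop c ≠ [] := by
        intro h
        have := congrArg List.length h
        simp at this; omega
      have ih := pvZip_spec names (ys'.drop c) (i + 1 + c) hdrop2 hne2
      rw [pvRunsB_cons, ← hc, ← ih, htail]
      simp [pvEmit, hx0]
termination_by ys.length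
decreasing_by simp only [List.length_drop, List.length_cons]; omega

-- the Nat boundary tail, seen from the Int side
theorem pvBoundaries_eq (names : List String) :
    pvBoundaries names ++ [(names.length : Int)] =
      ((0 :: pvTail names 0) ++ [names.length]).map (fun k : Nat => (k : Int)) := by
  unfold pvBoundaries
  rw [PySem.List.foldl_append_ite_eq_filter, PySem.List.pyRange_one, List.filter_map]
  have hm : (((names.length : Int)) - 1).toNat = names.length - 1 := by omega
  rw [hm]
  have hrange : pvTail names 0 =
      ((List.range (names.length - 1)).filter (fun k => pvQb names (k + 1))).map
        (fun k => 1 + k) := by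
    unfold pvTail
    simp only [Nat.sub_zero, Nat.zero_add]
    rw [List.range'_eq_map_range, List.filter_map]
    congr 1
    apply List.filter_congr
    intro k _
    simp only [Function.comp_apply]
    congr 1
    omega
  rw [hrange]
  simp only [List.cons_append, List.nil_append, List.map_cons, List.map_append,
    List.map_map, List.map_nil, Nat.cast_zero]
  congr 1
  congr 1
  rw [show (List.filter
        ((fun x => decide (PySem.List.pyGetD names x "" ≠ PySem.List.pyGetD names (x - 1) "")) ∘
          fun k : Nat => 1 + (k : Int))
        (List.range (names.length - 1))) =
      List.filter (fun k => pvQb names (k + 1)) (List.range (names.length - 1)) from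
    List.filter_congr fun k _ => by
      simp only [Function.comp_apply]
      rw [show (1 : Int) + (k : Int) = ((k + 1 : Nat) : Int) by push_cast; ring,
        show ((k + 1 : Nat) : Int) - 1 = ((k : Nat) : Int) by push_cast; ring,
        PySem.List.pyGetD_natCast, PySem.List.pyGetD_natCast]
      simp [pvQb]]
  apply List.map_congr_left
  intro k _
  simp only [Function.comp_apply]
  push_cast; ring

-- B equals the fold of pvIns over the run list
theorem pvAlt_eq_runs (names : List String) (hne : names ≠ []) :
    group_data_by_video_py_alt names =
      ((pvRunsB 0 names).foldl pvIns PySem.Dict.empty).items := by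
  unfold group_data_by_video_py_alt
  have hn : (names.length : Int) ≠ 0 := by
    simp [List.length_eq_zero_iff]; exact hne
  rw [if_neg hn]
  unfold pvEmitB
  rw [pvBoundaries_eq, PySem.List.slice_from_one,
    show ((((0 :: pvTail names 0) ++ [names.length]).map (fun k : Nat => (k : Int))).tail) =
      ((pvTail names 0 ++ [names.length]).map (fun k : Nat => (k : Int))) by simp,
    List.zip_map, List.foldl_map]
  have hfun : (fun (d : PySem.Dict String (Int × Int)) (p : Nat × Nat) =>
        d.insert (PySem.List.pyGetD names ((Prod.map (fun k : Nat => (k : Int))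
            (fun k : Nat => (k : Int)) p).1) "")
          ((Prod.map (fun k : Nat => (k : Int)) (fun k : Nat => (k : Int)) p).1,
           (Prod.map (fun k : Nat => (k : Int)) (fun k : Nat => (k : Int)) p).2)) =
      fun d p => pvIns d (pvEmit names p) := by
    funext d p
    simp [pvIns, pvEmit, Prod.map, PySem.List.pyGetD_natCast]
  rw [hfun, ← pvZip_spec names names 0 rfl hne, List.foldl_map]

-- ===== VERDICT (by name: the statement is the Claim_ definition above) =====
theorem group_data_by_video_py_spec : Claim_equal_group_data_by_video_py := by
  intro names _
  unfold Spec_group_data_by_video_py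
  cases names with
  | nil =>
    show group_data_by_video_py [] = group_data_by_video_py_alt []
    simp [group_data_by_video_py, group_data_by_video_py_alt]
  | cons x xs =>
    show group_data_by_video_py (x :: xs) = group_data_by_video_py_alt (x :: xs)
    rw [pvAlt_eq_runs (x :: xs) (by simp)]
    unfold group_data_by_video_py
    rw [pvRunsB_cons]
    show (pvLoopA PySem.Dict.empty x 0 0 (x :: xs)).items = _
    rw [pvLoopA, if_neg (by simp), pvLoopA_eq, pvSegs_eq_runsB]
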